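-- pv_equiv track=rewrite | github.com/ELares/cancer_research | scripts/verify_news_claims.py | search_corpus
-- ===== SOURCE A (Python) =====
-- def search_corpus(keywords: list[str], index: list[dict]) -> list[dict]:
--     """Search the corpus index for entries whose title contains any keyword.
--
--     Case-insensitive substring matching.  Returns a deduplicated list of
--     matching entries (each containing at least ``pmid`` and ``title``).
--     """
--     if not keywords or not index:
--         return []
--
--     lower_keywords = [kw.lower() for kw in keywords if len(kw) >= 3]
--     if not lower_keywords:
--         return []
--
--     seen_pmids: set[str] = set()
--     matches: list[dict] = []
--
--     for entry in index:
--         title = (entry.get("title") or "").lower()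
--         if not title:
--             continue
--         for kw in lower_keywords:
--             if kw in title:
--                 pmid = entry.get("pmid", "")
--                 if pmid and pmid not in seen_pmids:
--                     seen_pmids.add(pmid)
--                     matches.append(entry)
--                 break  # one keyword match is enough per entry
--
--     return matches
-- ===== SOURCE B (Python) =====
-- def search_corpus(keywords: list[str], index: list[dict]) -> list[dict]:
--     """Keyword-major rewrite: lowercase every title once, mark matching entry
--     positions per keyword, then emit entries in order with pmid dedup."""
--     lower_keywords = [kw.lower() for kw in keywords if len(kw) >= 3]
--     if not lower_keywords:
--         return []
--     titles = [(entry.get("title") or "").lower() for entry in index]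
--     hit: set[int] = set()
--     for kw in lower_keywords:
--         for i, title in enumerate(titles):
--             if kw in title:
--                 hit.add(i)
--     seen_pmids: set[str] = set()
--     matches: list[dict] = []
--     for i, entry in enumerate(index):
--         if i in hit:
--             pmid = entry.get("pmid", "")
--             if pmid and pmid not in seen_pmids:
--                 seen_pmids.add(pmid)
--                 matches.append(entry)
--     return matches
-- ===== Notes on version B (the rewrite author's own statement) =====
-- stated objective: alternative
-- what changed: Keyword-major restructure: B lowercases every title once into a list, marks matching entry positions in an index set per keyword, then emits matching entries in a separate ordered pass with pmid dedup, instead of A's entry-major loop with an inner break-on-first-keyword scan.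
import Mathlib
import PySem

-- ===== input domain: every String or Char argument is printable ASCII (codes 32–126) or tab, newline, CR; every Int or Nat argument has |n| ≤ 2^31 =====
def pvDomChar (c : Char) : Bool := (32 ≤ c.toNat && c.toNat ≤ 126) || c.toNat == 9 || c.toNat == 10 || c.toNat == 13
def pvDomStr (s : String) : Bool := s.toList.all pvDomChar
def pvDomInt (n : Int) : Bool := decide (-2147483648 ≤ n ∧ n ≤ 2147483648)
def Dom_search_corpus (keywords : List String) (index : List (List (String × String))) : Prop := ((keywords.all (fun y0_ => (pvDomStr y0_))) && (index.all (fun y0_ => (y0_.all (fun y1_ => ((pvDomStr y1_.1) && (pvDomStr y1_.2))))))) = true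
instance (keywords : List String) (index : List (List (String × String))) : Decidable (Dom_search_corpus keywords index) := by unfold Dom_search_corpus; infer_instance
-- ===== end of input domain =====

-- B is an alternative, keyword-major restructure of A (same result, similar cost); return-value equivalence only.

-- ===== PORT A =====
-- inner 'for kw in lower_keywords: … break' loop of A
def searchInnerA (entry : List (String × String)) (title : String) (kws : List String)
    (seen : PySem.Set String) (acc : List (List (String × String))) :
    PySem.Set String × List (List (String × String)) :=
  match kws with
  | [] => (seen, acc)
  | kw :: rest =>
    if PySem.Str.isIn kw title then
      let pmid := PySem.Dict.getD (PySem.Dict.mk entry) "pmid" ""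
      if pmid ≠ "" ∧ ¬ pmid ∈ seen then
        (PySem.Set.add seen pmid, acc ++ [entry])
      else (seen, acc)
    else searchInnerA entry title rest seen acc

def search_corpus (keywords : List String) (index : List (List (String × String))) : List (List (String × String)) :=
  if keywords = [] ∨ index = [] then []
  else
    let lower_keywords := (keywords.filter (fun kw => 3 ≤ PySem.Str.len kw)).map PySem.Str.lower
    if lower_keywords = [] then []
    else
      (index.foldl (fun st entry =>
          let title := PySem.Str.lower (PySem.Dict.getD (PySem.Dict.mk entry) "title" "")
          if title = "" then st
          else searchInnerA entry title lower_keywords st.1 st.2)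
        (PySem.Set.empty, [])).2

-- ===== PORT B =====
def search_corpus_alt (keywords : List String) (index : List (List (String × String))) : List (List (String × String)) :=
  let lower_keywords := (keywords.filter (fun kw => 3 ≤ PySem.Str.len kw)).map PySem.Str.lower
  if lower_keywords = [] then []
  else
    let titles := index.map (fun entry => PySem.Str.lower (PySem.Dict.getD (PySem.Dict.mk entry) "title" ""))
    let hit : PySem.Set Int := lower_keywords.foldl (fun h kw =>
        (PySem.List.enumerate titles 0).foldl
          (fun h p => if PySem.Str.isIn kw p.2 then PySem.Set.add h p.1 else h) h)
      PySem.Set.empty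
    ((PySem.List.enumerate index 0).foldl (fun st p =>
        if p.1 ∈ hit then
          let pmid := PySem.Dict.getD (PySem.Dict.mk p.2) "pmid" ""
          if pmid ≠ "" ∧ ¬ pmid ∈ st.1 then
            (PySem.Set.add st.1 pmid, st.2 ++ [p.2])
          else st
        else st)
      ((PySem.Set.empty : PySem.Set String), ([] : List (List (String × String))))).2

-- ===== PRECONDITION & SPEC =====
def Spec_search_corpus (keywords : List String) (index : List (List (String × String))) (out : List (List (String × String))) : Prop := out = search_corpus_alt keywords index
instance (keywords : List String) (index : List (List (String × String))) (out : List (List (String × String))) : Decidable (Spec_search_corpus keywords index out) := by unfold Spec_search_corpus; infer_instance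

-- ===== CLAIM (what is proved, stated in full; the proofs are below) =====
def Claim_equal_search_corpus : Prop := ∀ (keywords : List String) (index : List (List (String × String))), Dom_search_corpus keywords index → Spec_search_corpus keywords index (search_corpus keywords index)

-- ===== LEMMAS AND PROOFS =====

-- the inner break-loop of A fires its body iff some keyword matches
theorem searchInnerA_eq (entry : List (String × String)) (title : String)
    (kws : List String) (seen : PySem.Set String) (acc : List (List (String × String))) :
    searchInnerA entry title kws seen acc =
      if kws.any (fun kw => PySem.Str.isIn kw title) then
        (let pmid := PySem.Dict.getD (PySem.Dict.mk entry) "pmid" ""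
         if pmid ≠ "" ∧ ¬ pmid ∈ seen then
           (PySem.Set.add seen pmid, acc ++ [entry])
         else (seen, acc))
      else (seen, acc) := by
  induction kws with
  | nil => simp [searchInnerA]
  | cons kw rest ih =>
    by_cases h : PySem.Chars.isIn kw.toList title.toList = true
    · simp [searchInnerA, h]
    · simp [searchInnerA, h, ih]

-- membership in a fold that conditionally adds first components
theorem mem_foldl_add_iff {α : Type} (l : List (Int × α)) (c : Int × α → Bool)
    (h : PySem.Set Int) (x : Int) :
    x ∈ l.foldl (fun h p => if c p then PySem.Set.add h p.1 else h) h ↔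
      x ∈ h ∨ ∃ p ∈ l, c p ∧ p.1 = x := by
  induction l generalizing h with
  | nil => simp
  | cons p rest ih =>
    by_cases hc : c p
    · simp [hc, ih, PySem.Set.mem_add]
      tauto
    · simp [hc, ih]

-- membership in B's hit set
theorem mem_hit_iff (kws : List String) (titles : List String) (x : Int) :
    x ∈ kws.foldl (fun h kw =>
        (PySem.List.enumerate titles 0).foldl
          (fun h p => if PySem.Str.isIn kw p.2 then PySem.Set.add h p.1 else h) h)
      PySem.Set.empty ↔
      ∃ kw ∈ kws, ∃ p ∈ PySem.List.enumerate titles 0, PySem.Str.isIn kw p.2 ∧ p.1 = x := by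
  have key : ∀ (ks : List String) (h : PySem.Set Int),
      x ∈ ks.foldl (fun h kw =>
          (PySem.List.enumerate titles 0).foldl
            (fun h p => if PySem.Str.isIn kw p.2 then PySem.Set.add h p.1 else h) h) h ↔
        x ∈ h ∨ ∃ kw ∈ ks, ∃ p ∈ PySem.List.enumerate titles 0, PySem.Str.isIn kw p.2 ∧ p.1 = x := by
    intro ks
    induction ks with
    | nil => simp
    | cons kw rest ih =>
      intro h
      simp only [List.foldl_cons, ih, mem_foldl_add_iff]
      simp only [List.mem_cons, exists_eq_or_imp]
      rw [or_assoc]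
  simpa using key kws PySem.Set.empty

-- keywords surviving A's length filter are nonempty after lowering
theorem lkw_ne_nil (keywords : List String) (kw : String)
    (h : kw ∈ (keywords.filter (fun kw => 3 ≤ PySem.Str.len kw)).map PySem.Str.lower) :
    kw.toList ≠ [] := by
  rcases List.mem_map.mp h with ⟨k, hk, rfl⟩
  rcases List.mem_filter.mp hk with ⟨-, hlen⟩
  have hl : (PySem.Str.lower k).toList.length = k.toList.length := by
    simp [PySem.Str.toList_lower, PySem.Chars.lower]
  intro hnil
  rw [hnil] at hl
  rw [PySem.Str.len_eq] at hlen
  simp at hlen hl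
  omega

-- no nonempty keyword occurs in the empty title
theorem isIn_empty (l : List Char) (h : l ≠ []) : PySem.Chars.isIn l [] = false := by
  rw [PySem.Chars.isIn_eq_false_iff]
  simp [h]

-- core equality of the two loop structures, for any keyword list of nonempty keywords
theorem main_fold_eq (lkw : List String) (index : List (List (String × String)))
    (hne : ∀ kw ∈ lkw, kw.toList ≠ []) :
    (index.foldl (fun st entry =>
        if PySem.Str.lower (PySem.Dict.getD (PySem.Dict.mk entry) "title" "") = "" then st
        else searchInnerA entry (PySem.Str.lower (PySem.Dict.getD (PySem.Dict.mk entry) "title" "")) lkw st.1 st.2)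
      (PySem.Set.empty, [])).2 =
    ((PySem.List.enumerate index 0).foldl (fun st p =>
        if p.1 ∈ lkw.foldl (fun h kw =>
            (PySem.List.enumerate (index.map (fun entry => PySem.Str.lower (PySem.Dict.getD (PySem.Dict.mk entry) "title" ""))) 0).foldl
              (fun h p => if PySem.Str.isIn kw p.2 then PySem.Set.add h p.1 else h) h)
          PySem.Set.empty then
          if PySem.Dict.getD (PySem.Dict.mk p.2) "pmid" "" ≠ "" ∧ ¬ PySem.Dict.getD (PySem.Dict.mk p.2) "pmid" "" ∈ st.1 then
            (PySem.Set.add st.1 (PySem.Dict.getD (PySem.Dict.mk p.2) "pmid" ""), st.2 ++ [p.2])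
          else st
        else st)
      (PySem.Set.empty, [])).2 := by
  have hA : index.foldl (fun st entry =>
        if PySem.Str.lower (PySem.Dict.getD (PySem.Dict.mk entry) "title" "") = "" then st
        else searchInnerA entry (PySem.Str.lower (PySem.Dict.getD (PySem.Dict.mk entry) "title" "")) lkw st.1 st.2)
      ((PySem.Set.empty : PySem.Set String), ([] : List (List (String × String)))) =
      index.foldl (fun st entry =>
        if (lkw.any fun kw => PySem.Str.isIn kw (PySem.Str.lower (PySem.Dict.getD (PySem.Dict.mk entry) "title" ""))) then
          if PySem.Dict.getD (PySem.Dict.mk entry) "pmid" "" ≠ "" ∧ ¬ PySem.Dict.getD (PySem.Dict.mk entry) "pmid" "" ∈ st.1 then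
            (PySem.Set.add st.1 (PySem.Dict.getD (PySem.Dict.mk entry) "pmid" ""), st.2 ++ [entry])
          else st
        else st)
      (PySem.Set.empty, []) := by
    refine PySem.List.foldl_congr_mem' _ _ _ _ (fun entry hmem st => ?_)
    by_cases ht : PySem.Str.lower (PySem.Dict.getD (PySem.Dict.mk entry) "title" "") = ""
    · have hany : (lkw.any fun kw => PySem.Str.isIn kw (PySem.Str.lower (PySem.Dict.getD (PySem.Dict.mk entry) "title" ""))) = false := by
        rw [ht]
        exact List.any_eq_false.mpr (fun kw hkw => by simp [isIn_empty kw.toList (hne kw hkw)])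
      rw [if_pos ht]
      simp only [hany]
      simp
    · rw [if_neg ht, searchInnerA_eq]
  have hB : (PySem.List.enumerate index 0).foldl (fun st p =>
        if p.1 ∈ lkw.foldl (fun h kw =>
            (PySem.List.enumerate (index.map (fun entry => PySem.Str.lower (PySem.Dict.getD (PySem.Dict.mk entry) "title" ""))) 0).foldl
              (fun h p => if PySem.Str.isIn kw p.2 then PySem.Set.add h p.1 else h) h)
          PySem.Set.empty then
          if PySem.Dict.getD (PySem.Dict.mk p.2) "pmid" "" ≠ "" ∧ ¬ PySem.Dict.getD (PySem.Dict.mk p.2) "pmid" "" ∈ st.1 then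
            (PySem.Set.add st.1 (PySem.Dict.getD (PySem.Dict.mk p.2) "pmid" ""), st.2 ++ [p.2])
          else st
        else st)
      ((PySem.Set.empty : PySem.Set String), ([] : List (List (String × String)))) =
      (PySem.List.enumerate index 0).foldl (fun st p =>
        if (lkw.any fun kw => PySem.Str.isIn kw (PySem.Str.lower (PySem.Dict.getD (PySem.Dict.mk p.2) "title" ""))) then
          if PySem.Dict.getD (PySem.Dict.mk p.2) "pmid" "" ≠ "" ∧ ¬ PySem.Dict.getD (PySem.Dict.mk p.2) "pmid" "" ∈ st.1 then
            (PySem.Set.add st.1 (PySem.Dict.getD (PySem.Dict.mk p.2) "pmid" ""), st.2 ++ [p.2])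
          else st
        else st)
      (PySem.Set.empty, []) := by
    refine PySem.List.foldl_congr_mem' _ _ _ _ (fun p hp st => ?_)
    have hcond : p.1 ∈ lkw.foldl (fun h kw =>
            (PySem.List.enumerate (index.map (fun entry => PySem.Str.lower (PySem.Dict.getD (PySem.Dict.mk entry) "title" ""))) 0).foldl
              (fun h p => if PySem.Str.isIn kw p.2 then PySem.Set.add h p.1 else h) h)
          PySem.Set.empty ↔
        (lkw.any fun kw => PySem.Str.isIn kw (PySem.Str.lower (PySem.Dict.getD (PySem.Dict.mk p.2) "title" ""))) = true := by
      rw [mem_hit_iff]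
      rcases (PySem.List.mem_enumerate_iff _ _ _).mp hp with ⟨k, hk2, hpeq⟩
      subst hpeq
      constructor
      · rintro ⟨kw, hkw, q, hq, hin, hq1⟩
        rcases (PySem.List.mem_enumerate_iff _ _ _).mp hq with ⟨j, hj, rfl⟩
        have hjk : j = k := by simp at hq1; exact_mod_cast hq1
        subst hjk
        refine List.any_eq_true.mpr ⟨kw, hkw, ?_⟩
        simpa [List.getElem_map] using hin
      · intro hany
        rcases List.any_eq_true.mp hany with ⟨kw, hkw, hin⟩
        refine ⟨kw, hkw, ((0 : Int) + (k : Int), (index.map (fun entry => PySem.Str.lower (PySem.Dict.getD (PySem.Dict.mk entry) "title" "")))[k]'(by simpa using hk2)), (PySem.List.mem_enumerate_iff _ _ _).mpr ⟨k, by simpa using hk2, rfl⟩, ?_, by simp⟩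
        simpa [List.getElem_map] using hin
    exact if_congr hcond rfl rfl
  have hmap : index.foldl (fun st entry =>
        if (lkw.any fun kw => PySem.Str.isIn kw (PySem.Str.lower (PySem.Dict.getD (PySem.Dict.mk entry) "title" ""))) then
          if PySem.Dict.getD (PySem.Dict.mk entry) "pmid" "" ≠ "" ∧ ¬ PySem.Dict.getD (PySem.Dict.mk entry) "pmid" "" ∈ st.1 then
            (PySem.Set.add st.1 (PySem.Dict.getD (PySem.Dict.mk entry) "pmid" ""), st.2 ++ [entry])
          else st
        else st)
      ((PySem.Set.empty : PySem.Set String), ([] : List (List (String × String)))) =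
      (PySem.List.enumerate index 0).foldl (fun st p =>
        if (lkw.any fun kw => PySem.Str.isIn kw (PySem.Str.lower (PySem.Dict.getD (PySem.Dict.mk p.2) "title" ""))) then
          if PySem.Dict.getD (PySem.Dict.mk p.2) "pmid" "" ≠ "" ∧ ¬ PySem.Dict.getD (PySem.Dict.mk p.2) "pmid" "" ∈ st.1 then
            (PySem.Set.add st.1 (PySem.Dict.getD (PySem.Dict.mk p.2) "pmid" ""), st.2 ++ [p.2])
          else st
        else st)
      (PySem.Set.empty, []) := by
    conv_lhs => rw [← PySem.List.map_snd_enumerate index 0]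
    rw [List.foldl_map]
  rw [hA, hB, hmap]

-- ===== VERDICT (by name: the statement is the Claim_ definition above) =====
theorem search_corpus_spec : Claim_equal_search_corpus := by
  intro keywords index _dom
  unfold Spec_search_corpus search_corpus search_corpus_alt
  dsimp only
  by_cases hk : (keywords.filter (fun kw => 3 ≤ PySem.Str.len kw)).map PySem.Str.lower = []
  · rw [if_pos hk, if_pos hk]
    simp
  · by_cases hi : index = []
    · subst hi
      simp [PySem.List.enumerate]
    · have hkeys : ¬(keywords = [] ∨ index = []) := by
        rintro (rfl | rfl)
        · simp at hk
        · exact hi rfl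
      rw [if_neg hkeys, if_neg hk, if_neg hk]
      generalize hL : List.map PySem.Str.lower (List.filter (fun kw => decide (3 ≤ PySem.Str.len kw)) keywords) = lkw
      have hne : ∀ kw ∈ lkw, kw.toList ≠ [] := fun kw hkw => lkw_ne_nil keywords kw (by rw [hL]; exact hkw)
      exact main_fold_eq lkw index hne
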